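-- pv_equiv track=rewrite | github.com/fassbender1/softuni_fundamentals_tasks | HelloWorld/Fundamentals/text_processing/rage_quit.py | rage_quit
-- ===== SOURCE A (Python) =====
-- def rage_quit(string):
--     symbol_counter = 0
--     final_string = ""
--     string_found = ""
--     multiplier = ""
--
--     for index in range(len(string)):
--         if not string[index].isnumeric():
--             if string[index].upper() in final_string:
--                 string_found += string[index].upper()
--                 continue
--             symbol_counter += 1
--             string_found += string[index].upper()
--         else:
--             for next_symbols_index in range(index, len(string)):
--                 if not string[next_symbols_index].isnumeric():
--                     break
--                 multiplier += string[next_symbols_index]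
--
--             final_string += string_found * int(multiplier)
--             string_found = ""
--             multiplier = ""
--
--     return f"Unique symbols used: {symbol_counter}\n" \
--            f"{final_string}"
-- ===== SOURCE B (Python) =====
-- def rage_quit(string):
--     # stage 1: tokenize into maximal runs of digits / non-digits
--     tokens = []
--     for ch in string:
--         d = ch.isnumeric()
--         if tokens and tokens[-1][0] == d:
--             tokens[-1][1].append(ch)
--         else:
--             tokens.append((d, [ch]))
--     # stage 2: fold over the token list
--     count = 0
--     seen = set()
--     out = []
--     pending = ""
--     for d, chars in tokens:
--         if d:
--             times = int("".join(chars))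
--             if times:
--                 out.append(pending * times)
--                 seen.update(pending)
--             pending = ""
--         else:
--             up = "".join(chars).upper()
--             count += sum(1 for c in up if c not in seen)
--             pending = up
--     return "Unique symbols used: {}\n{}".format(count, "".join(out))
-- ===== Notes on version B (the rewrite author's own statement) =====
-- stated objective: alternative
-- what changed: B is staged: a first pass tokenizes the string into maximal digit/non-digit runs, then a single fold over the token list expands runs and counts, with a set of already-expanded characters; A is one indexed loop that rescans each digit run from every position inside it and tests membership by scanning the growing expanded output string.
import Mathlib
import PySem

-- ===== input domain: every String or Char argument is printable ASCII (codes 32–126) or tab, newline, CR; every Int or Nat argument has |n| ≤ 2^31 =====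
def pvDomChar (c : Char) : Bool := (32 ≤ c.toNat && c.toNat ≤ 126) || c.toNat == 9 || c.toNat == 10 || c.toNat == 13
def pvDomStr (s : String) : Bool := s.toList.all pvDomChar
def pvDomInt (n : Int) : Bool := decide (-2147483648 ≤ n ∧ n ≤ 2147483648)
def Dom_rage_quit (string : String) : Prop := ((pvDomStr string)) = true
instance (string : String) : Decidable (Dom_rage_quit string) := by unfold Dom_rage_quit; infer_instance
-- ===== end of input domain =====

-- B first tokenizes the string into maximal digit/non-digit runs, then folds once over the
-- token list (set of expanded characters, per-run counting) — a staged decomposition instead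
-- of A's indexed loop with an inner digit rescan and membership scans of the growing output.

-- ===== PORT A =====
-- inner 'for next_symbols_index in range(index, len(string)): if not digit: break; multiplier += ch'
-- (ported with a 'broken' flag for the break; str.isnumeric is Chars.isdigit, exact on the ASCII domain)
def rageInnerF (st : List Char × Bool) (c : Char) : List Char × Bool :=
  if st.2 then st
  else if !(PySem.Chars.isdigit c) then (st.1, true)
  else (st.1 ++ [c], st.2)

-- loop body; state = (symbol_counter, final_string, string_found, multiplier)
def rageStep (s : List Char) (st : Int × List Char × List Char × List Char) (index : Int) :
    Int × List Char × List Char × List Char :=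
  let c := PySem.List.pyGetD s index ' '
  if !(PySem.Chars.isdigit c) then
    if PySem.Chars.isIn [PySem.Chars.upperChar c] st.2.1 then
      (st.1, st.2.1, st.2.2.1 ++ [PySem.Chars.upperChar c], st.2.2.2)
    else
      (st.1 + 1, st.2.1, st.2.2.1 ++ [PySem.Chars.upperChar c], st.2.2.2)
  else
    let mult := ((PySem.List.pyRange index (PySem.List.len s)).foldl
        (fun acc j => rageInnerF acc (PySem.List.pyGetD s j ' ')) (st.2.2.2, false)).1
    -- int(multiplier): here multiplier is a nonempty all-digit run, so ofChars? is always `some`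
    let k := (PySem.Int.ofChars? mult).getD 0
    (st.1, st.2.1 ++ PySem.List.pyRepeat st.2.2.1 k, [], [])

def rage_quit (string : String) : String :=
  let s := string.toList
  let r := (PySem.List.pyRange 0 (PySem.List.len s)).foldl (rageStep s) (0, [], [], [])
  String.ofList ("Unique symbols used: ".toList ++ (PySem.Int.toStr r.1).toList ++ '\n' :: r.2.1)

-- ===== PORT B =====
-- stage 1 of Source B: the token list is built head-first (Python appends to tokens[-1]) and
-- reversed at the end — same token list, standard accumulator transliteration
def tokStep (acc : List (Bool × List Char)) (c : Char) : List (Bool × List Char) :=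
  let d := PySem.Chars.isdigit c
  match acc with
  | (b, cs) :: rest => if b = d then (b, cs ++ [c]) :: rest else (d, [c]) :: (b, cs) :: rest
  | [] => [(d, [c])]

def tokenize (s : List Char) : List (Bool × List Char) := (s.foldl tokStep []).reverse

-- stage 2 of Source B; state = (count, seen, out, pending)
def tokFold (st : Int × PySem.Set Char × List (List Char) × List Char)
    (t : Bool × List Char) : Int × PySem.Set Char × List (List Char) × List Char :=
  if t.1 then
    let times := (PySem.Int.ofChars? t.2).getD 0
    if times ≠ 0 then
      (st.1, PySem.Set.update st.2.1 st.2.2.2,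
       st.2.2.1 ++ [PySem.List.pyRepeat st.2.2.2 times], [])
    else (st.1, st.2.1, st.2.2.1, [])
  else
    let up := t.2.map PySem.Chars.upperChar
    (st.1 + ((up.filter (fun c => !PySem.Set.contains st.2.1 c)).length : Int),
     st.2.1, st.2.2.1, up)

def rage_quit_alt (string : String) : String :=
  let r := (tokenize string.toList).foldl tokFold (0, PySem.Set.empty, [], [])
  String.ofList ("Unique symbols used: ".toList ++ (PySem.Int.toStr r.1).toList ++ '\n' :: r.2.2.1.flatten)

-- ===== PRECONDITION & SPEC =====
def Spec_rage_quit (string : String) (out : String) : Prop := out = rage_quit_alt string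
instance (string : String) (out : String) : Decidable (Spec_rage_quit string out) := by unfold Spec_rage_quit; infer_instance

-- ===== CLAIM (what is proved, stated in full; the proofs are below) =====
def Claim_equal_rage_quit : Prop := ∀ (string : String), Dom_rage_quit string → Spec_rage_quit string (rage_quit string)

-- ===== LEMMAS AND PROOFS =====

-- proof-only intermediate form: a direct single-pass recursion, bridged to BOTH ports
def rageAltGo (cnt : Int) (seen : PySem.Set Char) (parts : List (List Char))
    (pending : List Char) (l : List Char) : Int × List (List Char) :=
  match l with
  | [] => (cnt, parts)
  | c :: rest =>
    if PySem.Chars.isdigit c then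
      let times := (PySem.Int.ofChars? (c :: rest.takeWhile PySem.Chars.isdigit)).getD 0
      let rest' := rest.dropWhile PySem.Chars.isdigit
      if 0 < times then
        rageAltGo cnt (PySem.Set.update seen pending)
          (parts ++ [PySem.List.pyRepeat pending times]) [] rest'
      else
        rageAltGo cnt seen parts [] rest'
    else
      let up := PySem.Chars.upperChar c
      rageAltGo (if PySem.Set.contains seen up then cnt else cnt + 1) seen parts
        (pending ++ [up]) rest
termination_by l.length
decreasing_by
  · exact Nat.lt_succ_of_le (List.length_dropWhile_le _ _)
  · exact Nat.lt_succ_of_le (List.length_dropWhile_le _ _)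
  · simp

theorem innerTrue (l : List Char) (m : List Char) :
    l.foldl rageInnerF (m, true) = (m, true) := by
  induction l with
  | nil => rfl
  | cons c t ih => simpa [rageInnerF] using ih

theorem innerFalse (l : List Char) (m : List Char) :
    (l.foldl rageInnerF (m, false)).1 = m ++ l.takeWhile PySem.Chars.isdigit := by
  induction l generalizing m with
  | nil => simp
  | cons c t ih =>
    by_cases h : PySem.Chars.isdigit c
    · simp [rageInnerF, h, ih]
    · simp [rageInnerF, h, innerTrue]

theorem pyRepeat_nonpos {α : Type} (l : List α) {k : Int} (hk : k ≤ 0) :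
    PySem.List.pyRepeat l k = [] := by
  have : k.toNat = 0 := Int.toNat_of_nonpos hk
  simp [PySem.List.pyRepeat, this]

theorem mem_pyRepeat {α : Type} (l : List α) {k : Int} (hk : 0 < k) (x : α) :
    x ∈ PySem.List.pyRepeat l k ↔ x ∈ l := by
  have : k.toNat ≠ 0 := by omega
  simp [PySem.List.pyRepeat, List.mem_flatten, List.mem_replicate, this]

theorem midFold (s : List Char) (idxs : List Int)
    (h : ∀ j ∈ idxs, PySem.Chars.isdigit (PySem.List.pyGetD s j ' ') = true)
    (cnt : Int) (final : List Char) :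
    idxs.foldl (rageStep s) (cnt, final, [], []) = (cnt, final, [], []) := by
  induction idxs with
  | nil => rfl
  | cons j t ih =>
    have hj := h j (List.mem_cons_self)
    have hstep : rageStep s (cnt, final, [], []) j = (cnt, final, [], []) := by
      simp only [rageStep, hj]
      simp [PySem.List.pyRepeat]
    simp only [List.foldl_cons, hstep]
    exact ih (fun j hjm => h j (List.mem_cons_of_mem _ hjm))

theorem isIn_singleton (x : Char) (l : List Char) :
    PySem.Chars.isIn [x] l = true ↔ x ∈ l := by
  rw [PySem.Chars.isIn_iff_infix, List.singleton_infix_iff]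

theorem rage_main : ∀ (fuel : Nat) (s : List Char) (i : Nat), s.length - i ≤ fuel → i ≤ s.length →
    ∀ (cnt : Int) (final found : List Char) (seen : PySem.Set Char) (parts : List (List Char)),
    (∀ x, x ∈ seen ↔ x ∈ final) → parts.flatten = final →
    (((PySem.List.pyRange i s.length).foldl (rageStep s) (cnt, final, found, [])).1,
     ((PySem.List.pyRange i s.length).foldl (rageStep s) (cnt, final, found, [])).2.1)
    = ((rageAltGo cnt seen parts found (s.drop i)).1,
       (rageAltGo cnt seen parts found (s.drop i)).2.flatten) := by
  intro fuel
  induction fuel with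
  | zero =>
    intro s i hf hi cnt final found seen parts hseen hparts
    have hie : i = s.length := by omega
    rw [PySem.List.pyRange_one_eq_nil (by exact_mod_cast le_of_eq hie.symm),
        List.drop_eq_nil_of_le (le_of_eq hie.symm)]
    simp [rageAltGo, hparts]
  | succ fuel ih =>
    intro s i hf hi cnt final found seen parts hseen hparts
    rcases Nat.lt_or_ge i s.length with hlt | hge
    · have hget : PySem.List.pyGetD s (i : Int) ' ' = s[i] := by
        rw [PySem.List.pyGetD_natCast]
        exact List.getD_eq_getElem s ' ' hlt
      have hdrop : s.drop i = s[i] :: s.drop (i + 1) := List.drop_eq_getElem_cons hlt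
      by_cases hd : PySem.Chars.isdigit s[i]
      · -- digit case: A flushes and then treats the rest of the run as no-op steps; B jumps past it
        set tw := (s.drop (i + 1)).takeWhile PySem.Chars.isdigit with htw
        have hrun : (s.drop i).takeWhile PySem.Chars.isdigit = s[i] :: tw := by
          rw [hdrop, List.takeWhile_cons, if_pos hd]
        have htwlen : tw.length ≤ s.length - (i + 1) := by
          have h1 := (List.takeWhile_prefix (l := s.drop (i + 1))
            (p := PySem.Chars.isdigit)).length_le
          simpa [htw] using h1
        have hir : i + (tw.length + 1) ≤ s.length := by omega
        have hmult : ((PySem.List.pyRange (i : Int) (PySem.List.len s)).foldl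
            (fun acc j => rageInnerF acc (PySem.List.pyGetD s j ' ')) (([] : List Char), false)).1
            = s[i] :: tw := by
          rw [PySem.List.foldl_pyRange_pyGetD s ' ' rageInnerF ([], false) (by positivity)]
          rw [innerFalse]
          simp [hrun]
        set k : Int := (PySem.Int.ofChars? (s[i] :: tw)).getD 0 with hk
        have hstep : rageStep s (cnt, final, found, []) (i : Int)
            = (cnt, final ++ PySem.List.pyRepeat found k, [], []) := by
          simp only [rageStep, hget, hd, Bool.not_true, Bool.false_eq_true, if_false, hmult, hk]
        have hsplit : PySem.List.pyRange (i : Int) (s.length : Int)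
            = PySem.List.pyRange (i : Int) ((i + (tw.length + 1) : Nat) : Int)
              ++ PySem.List.pyRange ((i + (tw.length + 1) : Nat) : Int) (s.length : Int) :=
          PySem.List.pyRange_one_append _ _ _ (by push_cast; omega) (by exact_mod_cast hir)
        have hcons : PySem.List.pyRange (i : Int) ((i + (tw.length + 1) : Nat) : Int)
            = (i : Int) :: PySem.List.pyRange ((i : Int) + 1) ((i + (tw.length + 1) : Nat) : Int) :=
          PySem.List.pyRange_one_cons (by push_cast; omega)
        have hmid : ∀ j ∈ PySem.List.pyRange ((i : Int) + 1) ((i + (tw.length + 1) : Nat) : Int),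
            PySem.Chars.isdigit (PySem.List.pyGetD s j ' ') = true := by
          intro j hj
          rw [PySem.List.mem_pyRange_one] at hj
          obtain ⟨m, rfl⟩ : ∃ m : Nat, j = (m : Int) :=
            ⟨j.toNat, (Int.toNat_of_nonneg (by omega)).symm⟩
          have hm1 : i + 1 ≤ m := by exact_mod_cast hj.1
          have hm2 : m < i + (tw.length + 1) := by exact_mod_cast hj.2
          have hmlen : m < s.length := by omega
          rw [PySem.List.pyGetD_natCast, List.getD_eq_getElem s ' ' hmlen]
          have hpre : (s.drop i).takeWhile PySem.Chars.isdigit <+: s.drop i :=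
            List.takeWhile_prefix _
          have hmi : m - i < ((s.drop i).takeWhile PySem.Chars.isdigit).length := by
            rw [hrun]; simp; omega
          have hgeteq : (s.drop i)[m - i]'(lt_of_lt_of_le hmi hpre.length_le)
              = ((s.drop i).takeWhile PySem.Chars.isdigit)[m - i]'hmi :=
            (List.IsPrefix.getElem hpre hmi).symm
          have hsm : s[m] = ((s.drop i).takeWhile PySem.Chars.isdigit)[m - i]'hmi := by
            rw [← hgeteq]
            rw [List.getElem_drop]
            congr 1
            omega
          rw [hsm]
          exact List.mem_takeWhile_imp (List.getElem_mem hmi)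
        have hrest : (s.drop (i + 1)).dropWhile PySem.Chars.isdigit
            = s.drop (i + (tw.length + 1)) := by
          have hdw := List.takeWhile_append_dropWhile
            (p := PySem.Chars.isdigit) (l := s.drop (i + 1))
          have hdw2 : (s.drop (i + 1)).drop tw.length
              = (s.drop (i + 1)).dropWhile PySem.Chars.isdigit := by
            conv_lhs => rw [← hdw]
            exact List.drop_left' (by rw [htw])
          rw [← hdw2, List.drop_drop]
          congr 1
          omega
        rw [hsplit, List.foldl_append, hcons, List.foldl_cons, hstep,
            midFold s _ hmid cnt (final ++ PySem.List.pyRepeat found k)]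
        rw [hdrop, rageAltGo]
        simp only [hd, if_true, ← htw, ← hk, hrest]
        by_cases hkpos : 0 < k
        · rw [if_pos hkpos]
          exact ih s (i + (tw.length + 1)) (by omega) hir cnt
            (final ++ PySem.List.pyRepeat found k) [] (PySem.Set.update seen found)
            (parts ++ [PySem.List.pyRepeat found k])
            (by
              intro x
              rw [PySem.Set.mem_update, hseen, List.mem_append, mem_pyRepeat found hkpos])
            (by simp [hparts])
        · rw [if_neg hkpos]
          have hek : PySem.List.pyRepeat found k = [] := pyRepeat_nonpos found (by omega)
          rw [hek, List.append_nil]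
          exact ih s (i + (tw.length + 1)) (by omega) hir cnt final [] seen parts hseen hparts
      · -- non-digit case: both sides take one character
        have hcond : PySem.Set.contains seen (PySem.Chars.upperChar s[i])
            = PySem.Chars.isIn [PySem.Chars.upperChar s[i]] final := by
          rw [Bool.eq_iff_iff, PySem.Set.contains_iff, isIn_singleton, hseen]
        have hstep : rageStep s (cnt, final, found, []) (i : Int)
            = ((if PySem.Chars.isIn [PySem.Chars.upperChar s[i]] final then cnt else cnt + 1),
               final, found ++ [PySem.Chars.upperChar s[i]], []) := by
          simp only [rageStep, hget, hd, Bool.not_false, if_true]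
          split <;> rfl
        rw [PySem.List.pyRange_one_cons (a := (i : Int)) (by exact_mod_cast hlt),
            List.foldl_cons, hstep, hdrop, rageAltGo]
        simp only [hd, Bool.false_eq_true, if_false, hcond]
        have hnext := ih s (i + 1) (by omega) hlt
            (if PySem.Chars.isIn [PySem.Chars.upperChar s[i]] final then cnt else cnt + 1)
            final (found ++ [PySem.Chars.upperChar s[i]]) seen parts hseen hparts
        have hcast : ((i : Int) + 1) = ((i + 1 : Nat) : Int) := by push_cast; ring
        rw [hcast]
        exact hnext
    · have hie : i = s.length := by omega
      rw [PySem.List.pyRange_one_eq_nil (by exact_mod_cast le_of_eq hie.symm),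
          List.drop_eq_nil_of_le (le_of_eq hie.symm)]
      simp [rageAltGo, hparts]

-- ----- B-side bridge: tokenize + tokFold = rageAltGo -----

theorem tok_shift (s : List Char) : ∀ (b : Bool) (cs : List Char) (rest : List (Bool × List Char)),
    s.foldl tokStep ((b, cs) :: rest) = s.foldl tokStep [(b, cs)] ++ rest := by
  induction s with
  | nil => intro b cs rest; rfl
  | cons c t ih =>
    intro b cs rest
    by_cases h : b = PySem.Chars.isdigit c
    · simp only [List.foldl_cons, tokStep, if_pos h]
      exact ih b (cs ++ [c]) rest
    · simp only [List.foldl_cons, tokStep, if_neg h]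
      rw [ih, ih (PySem.Chars.isdigit c) [c] [(b, cs)], List.append_assoc]
      rfl

theorem tok_run (s : List Char) : ∀ (b : Bool) (cs : List Char),
    s.foldl tokStep [(b, cs)]
      = (s.dropWhile (fun c => PySem.Chars.isdigit c == b)).foldl tokStep []
        ++ [(b, cs ++ s.takeWhile (fun c => PySem.Chars.isdigit c == b))] := by
  induction s with
  | nil => intro b cs; simp
  | cons c t ih =>
    intro b cs
    by_cases h : PySem.Chars.isdigit c = b
    · have hb : (PySem.Chars.isdigit c == b) = true := by simp [h]
      simp only [List.foldl_cons, tokStep, if_pos h.symm, List.takeWhile_cons,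
        List.dropWhile_cons, hb, if_pos rfl]
      rw [ih]
      simp only [if_pos trivial, List.append_assoc, List.singleton_append]
    · have hb : (PySem.Chars.isdigit c == b) = false := by simp [h]
      have hne : ¬ b = PySem.Chars.isdigit c := fun he => h he.symm
      simp only [List.foldl_cons, tokStep, if_neg hne, List.takeWhile_cons,
        List.dropWhile_cons, hb, Bool.false_eq_true, if_false, List.append_nil]
      rw [tok_shift]
  
theorem tokenize_cons (c : Char) (rest : List Char) :
    tokenize (c :: rest)
      = (PySem.Chars.isdigit c,
         c :: rest.takeWhile (fun x => PySem.Chars.isdigit x == PySem.Chars.isdigit c))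
        :: tokenize (rest.dropWhile (fun x => PySem.Chars.isdigit x == PySem.Chars.isdigit c)) := by
  unfold tokenize
  rw [List.foldl_cons]
  rw [show tokStep [] c = [(PySem.Chars.isdigit c, [c])] from rfl]
  rw [tok_run, List.reverse_append]
  rfl

theorem letterRun : ∀ (run : List Char), (∀ c ∈ run, PySem.Chars.isdigit c = false) →
    ∀ (cnt : Int) (seen : PySem.Set Char) (parts : List (List Char))
      (pending rest : List Char),
    rageAltGo cnt seen parts pending (run ++ rest)
      = rageAltGo
          (cnt + (((run.map PySem.Chars.upperChar).filter
              (fun c => !PySem.Set.contains seen c)).length : Int))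
          seen parts (pending ++ run.map PySem.Chars.upperChar) rest := by
  intro run
  induction run with
  | nil => intro _ cnt seen parts pending rest; simp
  | cons c t ih =>
    intro h cnt seen parts pending rest
    have hc := h c List.mem_cons_self
    rw [List.cons_append, rageAltGo]
    simp only [hc, Bool.false_eq_true, if_false]
    rw [ih (fun x hx => h x (List.mem_cons_of_mem _ hx))]
    congr 1
    · have hcb : PySem.Set.contains seen (PySem.Chars.upperChar c)
          = decide (PySem.Chars.upperChar c ∈ seen) := by
        simp [PySem.Set.contains_iff]
      by_cases hm : PySem.Chars.upperChar c ∈ seen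
      · simp [List.filter_cons, hcb, hm]
      · rw [List.map_cons, List.filter_cons]
        rw [if_neg (by simp [PySem.Set.contains_iff, hm])]
        rw [if_pos (by simp [hcb, hm])]
        rw [List.length_cons]
        push_cast
        omega
    · simp

theorem ofChars?_bind_nonneg (o : Option Nat) :
    0 ≤ ((do let a ← o; pure ((a : Int))) : Option Int).getD 0 := by
  cases o <;> simp

theorem ofChars?_digits_nonneg (l : List Char) (h : '-' ∉ l) :
    0 ≤ (PySem.Int.ofChars? l).getD 0 := by
  unfold PySem.Int.ofChars?
  dsimp only
  split
  · next ds heq =>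
    exfalso
    apply h
    have h1 : '-' ∈ (List.dropWhile PySem.Int.isIntSpace
        (List.dropWhile PySem.Int.isIntSpace l).reverse).reverse := by
      rw [heq]; exact List.mem_cons_self
    rw [List.mem_reverse] at h1
    have h2 := (List.dropWhile_sublist _
      (l := (List.dropWhile PySem.Int.isIntSpace l).reverse)).subset h1
    rw [List.mem_reverse] at h2
    exact (List.dropWhile_sublist _ (l := l)).subset h2
  · next ds heq =>
    simpa using ofChars?_bind_nonneg _
  · next ds h1 h2 =>
    simpa using ofChars?_bind_nonneg _

theorem isdigit_ne_dash (c : Char) (h : PySem.Chars.isdigit c = true) : ¬ c = '-' := by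
  rintro rfl
  simp [PySem.Chars.isdigit] at h

theorem bridge : ∀ (fuel : Nat) (s : List Char), s.length ≤ fuel →
    ∀ (cnt : Int) (seen : PySem.Set Char) (parts : List (List Char)) (pending : List Char),
    (pending = [] ∨ s.head?.all PySem.Chars.isdigit = true) →
    ((((tokenize s).foldl tokFold (cnt, seen, parts, pending)).1,
      ((tokenize s).foldl tokFold (cnt, seen, parts, pending)).2.2.1)
     = ((rageAltGo cnt seen parts pending s).1, (rageAltGo cnt seen parts pending s).2)) := by
  intro fuel
  induction fuel with
  | zero =>
    intro s hs cnt seen parts pending _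
    have : s = [] := List.length_eq_zero_iff.mp (by omega)
    subst this
    simp [tokenize, rageAltGo]
  | succ fuel ih =>
    intro s hs cnt seen parts pending hcond
    match s with
    | [] => simp [tokenize, rageAltGo]
    | c :: rest =>
      rw [tokenize_cons, List.foldl_cons]
      by_cases hd : PySem.Chars.isdigit c
      · -- digit run token
        have hpred : (fun x => PySem.Chars.isdigit x == PySem.Chars.isdigit c)
            = PySem.Chars.isdigit := by
          funext x; rw [hd]; simp
        rw [hpred]
        have hndash : '-' ∉ c :: rest.takeWhile PySem.Chars.isdigit := by
          intro hm
          rcases List.mem_cons.mp hm with h1 | h1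
          · exact isdigit_ne_dash c hd h1.symm
          · exact isdigit_ne_dash '-' (List.mem_takeWhile_imp h1) rfl
        have hnn : 0 ≤ (PySem.Int.ofChars? (c :: rest.takeWhile PySem.Chars.isdigit)).getD 0 :=
          ofChars?_digits_nonneg _ hndash
        rw [rageAltGo]
        simp only [hd, if_true]
        set k := (PySem.Int.ofChars? (c :: rest.takeWhile PySem.Chars.isdigit)).getD 0 with hk
        have hlen : (rest.dropWhile PySem.Chars.isdigit).length ≤ fuel := by
          have := List.length_dropWhile_le PySem.Chars.isdigit rest
          simp at hs; omega
        by_cases hkz : 0 < k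
        · have hstep : tokFold (cnt, seen, parts, pending)
              (true, c :: rest.takeWhile PySem.Chars.isdigit)
              = (cnt, PySem.Set.update seen pending,
                 parts ++ [PySem.List.pyRepeat pending k], []) := by
            simp only [tokFold, ← hk]
            rw [if_pos trivial, if_pos (by omega : ¬ k = 0)]
          rw [hstep, if_pos hkz]
          exact ih _ hlen _ _ _ _ (Or.inl rfl)
        · have hstep : tokFold (cnt, seen, parts, pending)
              (true, c :: rest.takeWhile PySem.Chars.isdigit)
              = (cnt, seen, parts, []) := by
            simp only [tokFold, ← hk]
            rw [if_pos trivial, if_neg (by omega : ¬ ¬ k = 0)]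
          rw [hstep, if_neg hkz]
          exact ih _ hlen _ _ _ _ (Or.inl rfl)
      · -- letter run token
        have hpend : pending = [] := by
          rcases hcond with h | h
          · exact h
          · exact absurd (by simpa using h) hd
        subst hpend
        have hdf : PySem.Chars.isdigit c = false := by simpa using hd
        have hpred : (fun x => PySem.Chars.isdigit x == PySem.Chars.isdigit c)
            = (fun x => PySem.Chars.isdigit x == false) := by rw [hdf]
        rw [hpred]
        set run := c :: rest.takeWhile (fun x => PySem.Chars.isdigit x == false) with hrundef
        set rest' := rest.dropWhile (fun x => PySem.Chars.isdigit x == false) with hrest'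
        have hsplit : c :: rest = run ++ rest' := by
          rw [hrundef, hrest', List.cons_append, List.takeWhile_append_dropWhile]
        have hall : ∀ x ∈ run, PySem.Chars.isdigit x = false := by
          intro x hx
          rcases List.mem_cons.mp hx with h1 | h1
          · rw [h1]; exact hdf
          · simpa using List.mem_takeWhile_imp h1
        have hstep : tokFold (cnt, seen, parts, [])
            (false, run)
            = (cnt + (((run.map PySem.Chars.upperChar).filter
                (fun x => !PySem.Set.contains seen x)).length : Int),
               seen, parts, run.map PySem.Chars.upperChar) := by
          simp [tokFold]
        rw [hdf, hstep]
        conv_rhs => rw [hsplit]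
        rw [letterRun run hall]
        simp only [List.nil_append]
        have hlen : rest'.length ≤ fuel := by
          rw [hrest']
          have := List.length_dropWhile_le (fun x => PySem.Chars.isdigit x == false) rest
          simp at hs; omega
        have hcond' : (run.map PySem.Chars.upperChar) = [] ∨
            rest'.head?.all PySem.Chars.isdigit = true := by
          right
          match hr : rest' with
          | [] => rfl
          | c2 :: r2 =>
            have h2 : (fun x => PySem.Chars.isdigit x == false) c2 = false := by
              have hh := List.head?_dropWhile_not (fun x => PySem.Chars.isdigit x == false) rest
              rw [← hrest'] at hh
              simpa using hh
            simpa using h2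
        exact ih _ hlen _ _ _ _ hcond' 

-- ===== VERDICT (by name: the statement is the Claim_ definition above) =====
theorem rage_quit_spec : Claim_equal_rage_quit := by
  intro string _
  unfold Spec_rage_quit rage_quit rage_quit_alt
  have hA := rage_main string.toList.length string.toList 0 (by omega) (by omega)
      0 [] [] PySem.Set.empty [] (by simp [PySem.Set.empty]) rfl
  have hB := bridge string.toList.length string.toList (by omega)
      0 PySem.Set.empty [] [] (Or.inl rfl)
  rw [Prod.mk.injEq] at hA hB
  simp only [Nat.cast_zero, List.drop_zero] at hA
  simp only [PySem.List.len_eq, hA.1, hA.2, hB.1, hB.2]
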